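-- pv_equiv track=rewrite | github.com/alialieghar-b/translation_project | tests/conftest.py | count_empty_lines
-- ===== SOURCE A (Python) =====
-- def count_empty_lines(content: str) -> int:
--     """Count consecutive empty lines."""
--     lines = content.split("\n")
--     max_consecutive = 0
--     current_consecutive = 0
--
--     for line in lines:
--         if line.strip() == "":
--             current_consecutive += 1
--             max_consecutive = max(max_consecutive, current_consecutive)
--         else:
--             current_consecutive = 0
--
--     return max_consecutive
-- ===== SOURCE B (Python) =====
-- def count_empty_lines(content: str) -> int:
--     """Count consecutive empty lines (span-based scan instead of a running counter)."""
--     lines = content.split("\n")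
--     n = len(lines)
--     best = 0
--     i = 0
--     while i < n:
--         if lines[i].strip() == "":
--             j = i
--             while j < n and lines[j].strip() == "":
--                 j += 1
--             best = max(best, j - i)
--             i = j
--         else:
--             i += 1
--     return best
-- ===== Notes on version B (the rewrite author's own statement) =====
-- stated objective: alternative
-- what changed: Replaces the per-line running counter with max update by a span-based scan that locates each maximal blank run with an inner loop and takes the max of whole run lengths.
import Mathlib
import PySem

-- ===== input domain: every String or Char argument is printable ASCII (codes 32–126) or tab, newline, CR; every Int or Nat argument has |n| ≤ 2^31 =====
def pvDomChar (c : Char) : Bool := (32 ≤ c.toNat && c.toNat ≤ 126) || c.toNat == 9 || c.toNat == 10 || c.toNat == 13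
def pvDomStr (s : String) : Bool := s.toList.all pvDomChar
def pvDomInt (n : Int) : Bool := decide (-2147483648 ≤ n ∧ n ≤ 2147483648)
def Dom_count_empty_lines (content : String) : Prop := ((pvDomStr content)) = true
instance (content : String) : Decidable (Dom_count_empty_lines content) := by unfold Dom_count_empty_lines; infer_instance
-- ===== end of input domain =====

-- B replaces A's running counter by a span-based scan over maximal blank runs (alternative decomposition, same cost).

-- ===== PORT A =====
-- A: one pass, running counter of current blank streak, running max.
def count_empty_lines (content : String) : Int :=
  let lines := PySem.Chars.splitOn content.toList ['\n']
  let s := lines.foldl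
    (fun (s : Int × Int) line =>
      if PySem.Chars.strip line == [] then
        (max s.1 (s.2 + 1), s.2 + 1)
      else (s.1, 0)) (0, 0)
  s.1

-- ===== PORT B =====
-- blank test of Source B: line.strip() == ""
def pvIsBlank (line : List Char) : Bool := PySem.Chars.strip line == []

-- Source B's outer while loop; the inner while that advances j over the blank run
-- is the takeWhile length, and i := j is the dropWhile.
def pvScan : List (List Char) → Int → Int
  | [], best => best
  | l :: t, best =>
    if pvIsBlank l then
      let k : Int := 1 + (t.takeWhile pvIsBlank).length
      pvScan (t.dropWhile pvIsBlank) (max best k)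
    else pvScan t best
termination_by ls _ => ls.length
decreasing_by
  · exact Nat.lt_succ_of_le (List.length_dropWhile_le _ _)
  · exact Nat.lt_succ_self _

def count_empty_lines_alt (content : String) : Int :=
  pvScan (PySem.Chars.splitOn content.toList ['\n']) 0

-- ===== PRECONDITION & SPEC =====
def Spec_count_empty_lines (content : String) (out : Int) : Prop := out = count_empty_lines_alt content
instance (content : String) (out : Int) : Decidable (Spec_count_empty_lines content out) := by unfold Spec_count_empty_lines; infer_instance

-- ===== CLAIM (what is proved, stated in full; the proofs are below) =====
def Claim_equal_count_empty_lines : Prop := ∀ (content : String), Dom_count_empty_lines content → Spec_count_empty_lines content (count_empty_lines content)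

-- ===== LEMMAS AND PROOFS =====

-- A's fold, written as structural recursion on the line list.
def pvStep : List (List Char) → Int → Int → Int
  | [], m, _ => m
  | l :: t, m, c =>
    if pvIsBlank l then pvStep t (max m (c + 1)) (c + 1)
    else pvStep t m 0

lemma pvStep_eq_foldl (ls : List (List Char)) (m c : Int) :
    pvStep ls m c =
      (ls.foldl (fun (s : Int × Int) line =>
        if PySem.Chars.strip line == [] then (max s.1 (s.2 + 1), s.2 + 1)
        else (s.1, 0)) (m, c)).1 := by
  induction ls generalizing m c with
  | nil => rfl
  | cons l t ih =>
    simp only [pvStep, pvIsBlank, List.foldl_cons]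
    by_cases h : (PySem.Chars.strip l == []) = true
    · simp [h, ih]
    · simp [h, ih]

-- running A over a list of blank lines just grows the counter and the max
lemma pvStep_blanks (bs rest : List (List Char)) (h : ∀ x ∈ bs, pvIsBlank x = true)
    (m c : Int) (hcm : c ≤ m ∨ bs ≠ []) :
    pvStep (bs ++ rest) m c = pvStep rest (max m (c + bs.length)) (c + bs.length) := by
  induction bs generalizing m c with
  | nil =>
    rcases hcm with h' | h'
    · simp [max_eq_left h']
    · exact absurd rfl h'
  | cons b bs ih =>
    have hb : pvIsBlank b = true := h b (List.mem_cons_self ..)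
    simp only [List.cons_append, pvStep, hb, if_pos]
    rw [ih (fun x hx => h x (List.mem_cons_of_mem _ hx)) _ _ (Or.inl (le_max_right _ _))]
    simp only [List.length_cons]
    congr 1
    · rw [max_assoc]
      congr 1
      push_cast
      omega
    · push_cast
      omega

-- the head of a dropWhile fails the predicate
lemma pvDropWhile_head_false {α : Type} (p : α → Bool) (ls : List α) (l : α) (t : List α)
    (h : ls.dropWhile p = l :: t) : p l = false := by
  induction ls with
  | nil => simp at h
  | cons a xs ih =>
    by_cases ha : p a = true
    · rw [List.dropWhile_cons_of_pos ha] at h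
      exact ih h
    · rw [List.dropWhile_cons_of_neg ha] at h
      cases h
      simpa using ha

-- pending counter is irrelevant when the next line is not blank (or the list ends)
lemma pvStep_reset (rest : List (List Char)) (hr : ∀ l t, rest = l :: t → pvIsBlank l = false)
    (m c : Int) : pvStep rest m c = pvStep rest m 0 := by
  cases rest with
  | nil => rfl
  | cons l t => simp [pvStep, hr l t rfl]

lemma pvStep_eq_pvScan (ls : List (List Char)) (best : Int) :
    pvStep ls best 0 = pvScan ls best := by
  induction hn : ls.length using Nat.strong_induction_on generalizing ls best with
  | _ n ih =>
  cases ls with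
  | nil => simp [pvStep, pvScan]
  | cons l t =>
    by_cases hb : pvIsBlank l = true
    · have htw : (l :: t).takeWhile pvIsBlank = l :: t.takeWhile pvIsBlank := by
        simp [hb]
      have hdw : (l :: t).dropWhile pvIsBlank = t.dropWhile pvIsBlank := by
        simp [hb]
      have key := pvStep_blanks ((l :: t).takeWhile pvIsBlank) ((l :: t).dropWhile pvIsBlank)
        (fun x hx => List.mem_takeWhile_imp hx) best 0 (Or.inr (by simp [htw]))
      rw [List.takeWhile_append_dropWhile] at key
      have hlen : (t.dropWhile pvIsBlank).length < n := by
        rw [← hn]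
        exact Nat.lt_succ_of_le (List.length_dropWhile_le _ _)
      rw [key, hdw,
        pvStep_reset _ (fun l' t' h' => pvDropWhile_head_false _ _ _ _ h') _ _,
        ih _ hlen _ _ rfl, pvScan]
      simp only [hb, if_pos]
      congr 2
      rw [htw]
      simp only [List.length_cons]
      push_cast
      omega
    · have hb' : pvIsBlank l = false := by simpa using hb
      have hlen : t.length < n := by rw [← hn]; simp
      rw [pvScan, pvStep]
      simp only [hb', Bool.false_eq_true, if_false]
      exact ih t.length hlen t best rfl

-- ===== VERDICT (by name: the statement is the Claim_ definition above) =====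
theorem count_empty_lines_spec : Claim_equal_count_empty_lines := by
  intro content _
  unfold Spec_count_empty_lines count_empty_lines count_empty_lines_alt
  rw [← pvStep_eq_pvScan, pvStep_eq_foldl]
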